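-- pv_equiv track=rewrite | github.com/trieli8/bolderdash_planning | tools/benchmarking/bench_plus_level_growth.py | generate_level_text
-- ===== SOURCE A (Python) =====
-- def generate_level_text(
--     rows: int,
--     cols: int,
--     required_gems: int,
--     max_time_min: int,
--     max_time_scale: int,
-- ) -> str:
--     # HiddenCellType IDs expected by existing problem generators.
--     AGENT = 0
--     DIRT = 2
--     STONE = 3
--     GEM = 5
--
--     grid = [[DIRT for _ in range(cols)] for _ in range(rows)]
--
--     agent_pos = (0, 0)
--     # Place gem as far from the agent as possible to avoid trivial maps.
--     gem_pos = None
--     best_dist = -1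
--     for r in range(rows):
--         for c in range(cols):
--             if (r, c) == agent_pos:
--                 continue
--             dist = abs(r - agent_pos[0]) + abs(c - agent_pos[1])
--             if dist > best_dist:
--                 best_dist = dist
--                 gem_pos = (r, c)
--             elif dist == best_dist and gem_pos is not None and (r, c) > gem_pos:
--                 # Deterministic tie-breaker: prefer bottom-right-ish coordinates.
--                 gem_pos = (r, c)
--     if gem_pos is None or best_dist <= 1:
--         raise ValueError(f"Could not place non-adjacent gem for {rows}x{cols}")
--
--     blocked = {agent_pos, gem_pos}
--     stone_candidates = [
--         (rows // 2, cols // 2),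
--         (rows - 1, 0),
--         (0, cols - 1),
--         (rows - 1, cols - 1),
--     ]
--     stone_pos = None
--     for r, c in stone_candidates:
--         if 0 <= r < rows and 0 <= c < cols and (r, c) not in blocked:
--             stone_pos = (r, c)
--             break
--     if stone_pos is None:
--         for r in range(rows - 1, -1, -1):
--             for c in range(cols - 1, -1, -1):
--                 if (r, c) not in blocked:
--                     stone_pos = (r, c)
--                     break
--             if stone_pos is not None:
--                 break
--     if stone_pos is None:
--         raise ValueError(f"Could not place stone for {rows}x{cols}")
--
--     grid[agent_pos[0]][agent_pos[1]] = AGENT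
--     grid[gem_pos[0]][gem_pos[1]] = GEM
--     grid[stone_pos[0]][stone_pos[1]] = STONE
--
--     max_time = max(max_time_min, rows * cols * max_time_scale)
--     header = f"{rows}|{cols}|{max_time}|{required_gems}|"
--     body = "\n".join("|".join(f"{cell:02d}" for cell in row) + "|" for row in grid)
--     return f"{header}\n{body}\n"
-- ===== SOURCE B (Python) =====
-- def generate_level_text(
--     rows: int,
--     cols: int,
--     required_gems: int,
--     max_time_min: int,
--     max_time_scale: int,
-- ) -> str:
--     # Closed form: the agent sits at (0, 0), so Manhattan distance r + c is
--     # uniquely maximal at the bottom-right corner -- no search needed.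
--     if rows < 1 or cols < 1 or rows + cols < 4:
--         raise ValueError(f"Could not place non-adjacent gem for {rows}x{cols}")
--     agent = (0, 0)
--     gem = (rows - 1, cols - 1)
--     stone = next(
--         pos
--         for pos in [(rows // 2, cols // 2), (rows - 1, 0), (0, cols - 1), (rows - 1, cols - 1)]
--         if pos != agent and pos != gem
--     )
--     special = {agent: 0, gem: 5, stone: 3}
--     max_time = max(max_time_min, rows * cols * max_time_scale)
--     body = "\n".join(
--         "|".join(f"{special.get((r, c), 2):02d}" for c in range(cols)) + "|"
--         for r in range(rows)
--     )
--     return f"{rows}|{cols}|{max_time}|{required_gems}|\n{body}\n"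
-- ===== Notes on version B (the rewrite author's own statement) =====
-- stated objective: simpler
-- what changed: B replaces A's exhaustive nested max-distance scan, the materialized mutable grid and the reverse fallback scan by closed-form placements (the gem is uniquely farthest at the bottom-right corner) plus a 3-entry override dict consulted while serializing each cell directly.
import Mathlib
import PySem

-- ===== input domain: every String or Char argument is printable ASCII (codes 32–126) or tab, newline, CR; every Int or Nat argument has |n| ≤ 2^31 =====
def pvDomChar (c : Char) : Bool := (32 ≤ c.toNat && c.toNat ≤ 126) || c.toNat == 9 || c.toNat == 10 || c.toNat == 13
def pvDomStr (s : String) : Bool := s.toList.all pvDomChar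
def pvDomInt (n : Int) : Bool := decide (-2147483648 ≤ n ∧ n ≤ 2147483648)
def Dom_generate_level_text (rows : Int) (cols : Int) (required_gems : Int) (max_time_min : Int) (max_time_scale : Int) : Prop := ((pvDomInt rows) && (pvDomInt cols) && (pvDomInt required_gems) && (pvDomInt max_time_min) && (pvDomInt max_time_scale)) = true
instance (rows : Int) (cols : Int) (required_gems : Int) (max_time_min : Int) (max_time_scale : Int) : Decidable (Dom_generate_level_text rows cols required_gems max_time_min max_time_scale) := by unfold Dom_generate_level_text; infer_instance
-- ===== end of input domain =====

-- B replaces A's exhaustive farthest-cell scan, mutable grid and fallback scan by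
-- closed-form placements and a 3-entry override dict read during serialization (objective: simpler).

-- f"{n:02d}" (exact: zero-pad to width 2, sign kept in front) — used by both Pythons
def pyFmt02 (n : Int) : String := PySem.Str.zfill (PySem.Int.toStr n) 2

-- ===== PORT A =====

-- one iteration of A's gem-placement scan (body of the nested for loops)
def gemStep (st : Option (Int × Int) × Int) (p : Int × Int) : Option (Int × Int) × Int :=
  if p = ((0 : Int), (0 : Int)) then st
  else
    let dist : Int := |p.1 - 0| + |p.2 - 0|
    if dist > st.2 then (some p, dist)
    else if dist = st.2 ∧ (match st.1 with
          | some g => decide (p.1 > g.1 ∨ (p.1 = g.1 ∧ p.2 > g.2))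
          | none => false) = true then (some p, st.2)
    else st

-- grid[p0][p1] = v  (indices are in range wherever A executes this; pyGetD/pySetD are the total forms)
def setCell (g : List (List Int)) (p : Int × Int) (v : Int) : List (List Int) :=
  PySem.List.pySetD g p.1 (PySem.List.pySetD (PySem.List.pyGetD g p.1 []) p.2 v)

def generate_level_text (rows : Int) (cols : Int) (required_gems : Int) (max_time_min : Int) (max_time_scale : Int) : String :=
  let grid : List (List Int) :=
    (PySem.List.pyRange 0 rows 1).map (fun _ => (PySem.List.pyRange 0 cols 1).map (fun _ => (2 : Int)))
  let scan : Option (Int × Int) × Int :=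
    (PySem.List.pyRange 0 rows 1).foldl
      (fun st r => (PySem.List.pyRange 0 cols 1).foldl (fun st c => gemStep st (r, c)) st)
      (none, -1)
  match scan.1 with
  | none => ""  -- raise ValueError (excluded by Pre_)
  | some gem_pos =>
    if scan.2 ≤ 1 then ""  -- raise ValueError (excluded by Pre_)
    else
      let blocked : PySem.Set (Int × Int) := PySem.Set.ofList [((0 : Int), (0 : Int)), gem_pos]
      let cands : List (Int × Int) :=
        [(PySem.Int.floordiv rows 2, PySem.Int.floordiv cols 2), (rows - 1, 0), (0, cols - 1), (rows - 1, cols - 1)]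
      let stone0 : Option (Int × Int) :=
        cands.find? (fun p => decide (0 ≤ p.1) && decide (p.1 < rows) && decide (0 ≤ p.2) && decide (p.2 < cols)
          && !(PySem.Set.contains blocked p))
      let stone1 : Option (Int × Int) :=
        match stone0 with
        | some s => some s
        | none =>
          (PySem.List.pyRange (rows - 1) (-1) (-1)).foldl
            (fun acc r =>
              match acc with
              | some s => some s
              | none =>
                (PySem.List.pyRange (cols - 1) (-1) (-1)).foldl
                  (fun acc2 c =>
                    match acc2 with
                    | some s => some s
                    | none => if !(PySem.Set.contains blocked (r, c)) then some (r, c) else none)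
                  none)
            none
      match stone1 with
      | none => ""  -- raise ValueError (never reached when the gem was placed; excluded by Pre_)
      | some stone_pos =>
        let grid1 := setCell grid ((0 : Int), (0 : Int)) 0
        let grid2 := setCell grid1 gem_pos 5
        let grid3 := setCell grid2 stone_pos 3
        let max_time := max max_time_min (rows * cols * max_time_scale)
        let header := PySem.Int.toStr rows ++ "|" ++ PySem.Int.toStr cols ++ "|" ++ PySem.Int.toStr max_time
          ++ "|" ++ PySem.Int.toStr required_gems ++ "|"
        let body := PySem.Str.join "\n" (grid3.map (fun row => PySem.Str.join "|" (row.map pyFmt02) ++ "|"))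
        header ++ "\n" ++ body ++ "\n"

-- ===== PORT B =====
def generate_level_text_alt (rows : Int) (cols : Int) (required_gems : Int) (max_time_min : Int) (max_time_scale : Int) : String :=
  if rows < 1 ∨ cols < 1 ∨ rows + cols < 4 then ""  -- raise ValueError (excluded by Pre_)
  else
    let gem : Int × Int := (rows - 1, cols - 1)
    match ([(PySem.Int.floordiv rows 2, PySem.Int.floordiv cols 2), (rows - 1, 0), (0, cols - 1), (rows - 1, cols - 1)] : List (Int × Int)).find?
        (fun p => !(p == ((0 : Int), (0 : Int))) && !(p == gem)) with
    | none => ""  -- StopIteration (never reached past the guard; excluded by Pre_)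
    | some stone =>
      let special : PySem.Dict (Int × Int) Int :=
        (((PySem.Dict.empty).insert ((0 : Int), (0 : Int)) 0).insert gem 5).insert stone 3
      let max_time := max max_time_min (rows * cols * max_time_scale)
      let header := PySem.Int.toStr rows ++ "|" ++ PySem.Int.toStr cols ++ "|" ++ PySem.Int.toStr max_time
        ++ "|" ++ PySem.Int.toStr required_gems ++ "|"
      let body := PySem.Str.join "\n" ((PySem.List.pyRange 0 rows 1).map (fun r =>
        PySem.Str.join "|" ((PySem.List.pyRange 0 cols 1).map (fun c => pyFmt02 (special.getD (r, c) 2))) ++ "|"))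
      header ++ "\n" ++ body ++ "\n"

-- ===== PRECONDITION & SPEC =====
-- Pre_ excludes exactly the inputs on which A raises ValueError (no gem cell or the best
-- distance is ≤ 1, i.e. rows < 1, cols < 1 or rows + cols < 4); B raises there too.
def Pre_generate_level_text (rows : Int) (cols : Int) (required_gems : Int) (max_time_min : Int) (max_time_scale : Int) : Prop :=
  1 ≤ rows ∧ 1 ≤ cols ∧ 4 ≤ rows + cols
instance (rows : Int) (cols : Int) (required_gems : Int) (max_time_min : Int) (max_time_scale : Int) : Decidable (Pre_generate_level_text rows cols required_gems max_time_min max_time_scale) := by unfold Pre_generate_level_text; infer_instance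

def pvWitness_generate_level_text : Int × Int × Int × Int × Int := (3, 3, 5, 10, 2)

def Spec_generate_level_text (rows : Int) (cols : Int) (required_gems : Int) (max_time_min : Int) (max_time_scale : Int) (out : String) : Prop := out = generate_level_text_alt rows cols required_gems max_time_min max_time_scale
instance (rows : Int) (cols : Int) (required_gems : Int) (max_time_min : Int) (max_time_scale : Int) (out : String) : Decidable (Spec_generate_level_text rows cols required_gems max_time_min max_time_scale out) := by unfold Spec_generate_level_text; infer_instance

-- ===== CLAIM (what is proved, stated in full; the proofs are below) =====
def Claim_equal_generate_level_text : Prop := ∀ (rows : Int) (cols : Int) (required_gems : Int) (max_time_min : Int) (max_time_scale : Int), Dom_generate_level_text rows cols required_gems max_time_min max_time_scale → Pre_generate_level_text rows cols required_gems max_time_min max_time_scale → Spec_generate_level_text rows cols required_gems max_time_min max_time_scale (generate_level_text rows cols required_gems max_time_min max_time_scale)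

-- ===== LEMMAS AND PROOFS =====

-- a nested for-loop fold is the fold over the flattened cell list
theorem pv_foldl_flatMap {α β γ : Type} (f : γ → α → γ) (g : β → List α) (l : List β) (init : γ) :
    l.foldl (fun s r => (g r).foldl f s) init = (l.flatMap g).foldl f init := by
  induction l generalizing init with
  | nil => rfl
  | cons a t ih => simp [List.flatMap_cons, List.foldl_append, ih]

-- invariant: the running best distance never exceeds a bound on all seen distances
theorem pv_gemStep_snd_le (L : List (Int × Int)) (st : Option (Int × Int) × Int) (D : Int)
    (hst : st.2 ≤ D) (hL : ∀ p ∈ L, |p.1 - 0| + |p.2 - 0| ≤ D) :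
    (L.foldl gemStep st).2 ≤ D := by
  induction L generalizing st with
  | nil => simpa using hst
  | cons a t ih =>
    refine ih (gemStep st a) ?_ (fun p hp => hL p (List.mem_cons_of_mem _ hp))
    have ha := hL a List.mem_cons_self
    simp only [gemStep]
    split_ifs <;> simp_all

-- a last cell strictly farther than everything before it wins the scan
theorem pv_gemStep_last (L : List (Int × Int)) (q : Int × Int) (st : Option (Int × Int) × Int) (D : Int)
    (hq : q ≠ ((0 : Int), (0 : Int))) (hd : D < |q.1 - 0| + |q.2 - 0|) (hst : st.2 ≤ D)
    (hL : ∀ p ∈ L, |p.1 - 0| + |p.2 - 0| ≤ D) :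
    ((L ++ [q]).foldl gemStep st) = (some q, |q.1 - 0| + |q.2 - 0|) := by
  rw [List.foldl_append]
  have h2 : (L.foldl gemStep st).2 ≤ D := pv_gemStep_snd_le L st D hst hL
  have hlt : (L.foldl gemStep st).2 < |q.1 - 0| + |q.2 - 0| := lt_of_le_of_lt h2 hd
  simp only [List.foldl_cons, List.foldl_nil, gemStep]
  split_ifs with hA
  · exact absurd hA hq
  · rfl

-- A's full scan finds the bottom-right corner at distance rows+cols-2
theorem pv_scan_eq (rows cols : Int) (h1 : 1 ≤ rows) (h2 : 1 ≤ cols) (h3 : 4 ≤ rows + cols) :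
    ((PySem.List.pyRange 0 rows 1).foldl
      (fun st r => (PySem.List.pyRange 0 cols 1).foldl (fun st c => gemStep st (r, c)) st)
      (none, -1))
    = (some (rows - 1, cols - 1), rows + cols - 2) := by
  have hfold : ∀ (st : Option (Int × Int) × Int) (r : Int),
      (PySem.List.pyRange 0 cols 1).foldl (fun st c => gemStep st (r, c)) st
      = ((PySem.List.pyRange 0 cols 1).map (fun c => (r, c))).foldl gemStep st := by
    intro st r; rw [List.foldl_map]
  simp only [hfold]
  rw [pv_foldl_flatMap]
  have hr : PySem.List.pyRange 0 rows 1 = PySem.List.pyRange 0 (rows - 1) 1 ++ [rows - 1] := by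
    have h := PySem.List.pyRange_one_succ_right (a := 0) (b := rows - 1) (by omega)
    simpa using h
  have hc : PySem.List.pyRange 0 cols 1 = PySem.List.pyRange 0 (cols - 1) 1 ++ [cols - 1] := by
    have h := PySem.List.pyRange_one_succ_right (a := 0) (b := cols - 1) (by omega)
    simpa using h
  rw [hr, List.flatMap_append]
  simp only [List.flatMap_cons, List.flatMap_nil, List.append_nil]
  rw [hc, List.map_append, ← List.append_assoc]
  simp only [List.map_cons, List.map_nil]
  have habs : |rows - 1 - 0| + |cols - 1 - 0| = rows + cols - 2 := by
    rw [abs_of_nonneg (by omega), abs_of_nonneg (by omega)]; ring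
  refine (pv_gemStep_last _ ((rows - 1, cols - 1)) _ (rows + cols - 3) ?_ ?_ ?_ ?_).trans ?_
  · simp only [ne_eq, Prod.mk.injEq, not_and]; intro h1' h2'; omega
  · simp only []; rw [habs]; omega
  · simp; omega
  · intro p hp
    rcases List.mem_append.mp hp with h | h
    · rcases List.mem_flatMap.mp h with ⟨r, hrmem, hpm⟩
      rcases List.mem_map.mp hpm with ⟨c, hcmem, rfl⟩
      have hb1 := (PySem.List.mem_pyRange_one.mp hrmem)
      have hb2 : 0 ≤ c ∧ c ≤ cols - 1 := by
        rcases List.mem_append.mp hcmem with h' | h'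
        · have := PySem.List.mem_pyRange_one.mp h'; omega
        · simp at h'; omega
      simp only []
      rw [abs_of_nonneg (by omega), abs_of_nonneg (by omega)]; omega
    · rcases List.mem_map.mp h with ⟨c, hcmem, rfl⟩
      have hb2 := (PySem.List.mem_pyRange_one.mp hcmem)
      simp only []
      rw [abs_of_nonneg (by omega), abs_of_nonneg (by omega)]; omega
  · rw [habs]

-- setting one in-range cell of a rectangular table updates it pointwise
def pvTable (rows cols : Int) (f : Int → Int → Int) : List (List Int) :=
  (PySem.List.pyRange 0 rows 1).map (fun r => (PySem.List.pyRange 0 cols 1).map (fun c => f r c))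

theorem pv_setCell_table (rows cols a b w : Int) (f : Int → Int → Int)
    (ha : 0 ≤ a) (ha' : a < rows) (hb : 0 ≤ b) (hb' : b < cols) :
    setCell (pvTable rows cols f) (a, b) w
    = pvTable rows cols (fun r c => if r = a ∧ c = b then w else f r c) := by
  unfold setCell pvTable
  dsimp only
  rw [PySem.List.pySetD_of_nonneg _ _ ha, PySem.List.pySetD_of_nonneg _ _ hb]
  rw [PySem.List.pyGetD_eq_getElem _ _ ha (by simp [PySem.List.length_pyRange_one]; omega)]
  rw [List.getElem_map, PySem.List.getElem_pyRange_one]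
  apply List.ext_getElem
  · simp
  · intro i hi1 hi2
    simp only [List.getElem_set, List.getElem_map, PySem.List.getElem_pyRange_one] at *
    by_cases hia : a.toNat = i
    · subst hia
      rw [if_pos rfl]
      apply List.ext_getElem
      · simp
      · intro j hj1 hj2
        simp only [List.getElem_set, List.getElem_map, PySem.List.getElem_pyRange_one]
        by_cases hjb : b.toNat = j
        · subst hjb
          rw [if_pos rfl, if_pos (by constructor <;> omega)]
        · rw [if_neg hjb, if_neg (by intro hcon; omega)]
    · rw [if_neg hia]
      apply List.map_congr_left
      intro c _
      rw [if_neg (by intro hcon; omega)]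

-- find? only looks at the predicate's values on the list's elements
theorem pv_find?_congr {α : Type} (l : List α) (p q : α → Bool) (h : ∀ x ∈ l, p x = q x) :
    l.find? p = l.find? q := by
  induction l with
  | nil => rfl
  | cons a t ih =>
    simp only [List.find?_cons]
    rw [h a List.mem_cons_self]
    cases q a
    · exact ih (fun x hx => h x (List.mem_cons_of_mem _ hx))
    · rfl

-- ===== VERDICT (by name: the statement is the Claim_ definition above) =====
theorem generate_level_text_spec : Claim_equal_generate_level_text := by
  intro rows cols required_gems max_time_min max_time_scale _ hPre
  obtain ⟨h1, h2, h3⟩ := hPre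
  unfold Spec_generate_level_text generate_level_text generate_level_text_alt
  dsimp only
  rw [pv_scan_eq rows cols h1 h2 h3]
  dsimp only
  rw [if_neg (by omega : ¬ rows + cols - 2 ≤ 1), if_neg (by omega : ¬ (rows < 1 ∨ cols < 1 ∨ rows + cols < 4))]
  have hcont : ∀ p : Int × Int,
      (PySem.Set.ofList [((0 : Int), (0 : Int)), (rows - 1, cols - 1)]).contains p
      = (p == ((0 : Int), (0 : Int)) || p == (rows - 1, cols - 1)) := by
    intro p
    rw [Bool.eq_iff_iff]
    simp [PySem.Set.mem_ofList]
  have hfd_r : PySem.Int.floordiv rows 2 = rows / 2 := PySem.Int.floordiv_eq_ediv_of_pos (by omega)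
  have hfd_c : PySem.Int.floordiv cols 2 = cols / 2 := PySem.Int.floordiv_eq_ediv_of_pos (by omega)
  have hAB : List.find?
        (fun p : Int × Int =>
          decide (0 ≤ p.1) && decide (p.1 < rows) && decide (0 ≤ p.2) && decide (p.2 < cols) &&
            !(PySem.Set.ofList [((0 : Int), (0 : Int)), (rows - 1, cols - 1)]).contains p)
        [(PySem.Int.floordiv rows 2, PySem.Int.floordiv cols 2), (rows - 1, 0), (0, cols - 1),
          (rows - 1, cols - 1)]
      = List.find? (fun p : Int × Int => !p == ((0 : Int), (0 : Int)) && !p == (rows - 1, cols - 1))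
        [(PySem.Int.floordiv rows 2, PySem.Int.floordiv cols 2), (rows - 1, 0), (0, cols - 1),
          (rows - 1, cols - 1)] := by
    apply pv_find?_congr
    intro x hx
    rw [hcont x]
    have hbounds : 0 ≤ x.1 ∧ x.1 < rows ∧ 0 ≤ x.2 ∧ x.2 < cols := by
      simp only [List.mem_cons, List.not_mem_nil, or_false] at hx
      rcases hx with rfl | rfl | rfl | rfl <;> simp <;> omega
    simp [hbounds.1, hbounds.2.1, hbounds.2.2.1, hbounds.2.2.2]
  obtain ⟨st, hst⟩ : ∃ st, List.find?
      (fun p : Int × Int => !p == ((0 : Int), (0 : Int)) && !p == (rows - 1, cols - 1))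
      [(PySem.Int.floordiv rows 2, PySem.Int.floordiv cols 2), (rows - 1, 0), (0, cols - 1),
        (rows - 1, cols - 1)] = some st := by
    apply Option.isSome_iff_exists.mp
    apply List.find?_isSome.mpr
    by_cases hrc : 2 ≤ rows ∧ 2 ≤ cols
    · refine ⟨(rows - 1, 0), by simp, ?_⟩
      simp only [Bool.and_eq_true, Bool.not_eq_eq_eq_not, Bool.not_true, beq_eq_false_iff_ne,
        ne_eq, Prod.mk.injEq, not_and]
      constructor <;> intro h' <;> omega
    · by_cases hr1 : rows = 1
      · refine ⟨(PySem.Int.floordiv rows 2, PySem.Int.floordiv cols 2), by simp, ?_⟩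
        simp only [Bool.and_eq_true, Bool.not_eq_eq_eq_not, Bool.not_true, beq_eq_false_iff_ne,
          ne_eq, Prod.mk.injEq, not_and, hfd_r, hfd_c]
        constructor <;> intro h' <;> omega
      · refine ⟨(PySem.Int.floordiv rows 2, PySem.Int.floordiv cols 2), by simp, ?_⟩
        have hc1 : cols = 1 := by omega
        simp only [Bool.and_eq_true, Bool.not_eq_eq_eq_not, Bool.not_true, beq_eq_false_iff_ne,
          ne_eq, Prod.mk.injEq, not_and, hfd_r, hfd_c]
        constructor <;> intro h' <;> omega
  have hpa := List.find?_some (hAB.trans hst)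
  have hpb := List.find?_some hst
  rw [hAB, hst]
  dsimp only
  rcases st with ⟨s1, s2⟩
  simp only [Bool.and_eq_true, decide_eq_true_eq, Bool.not_eq_eq_eq_not, Bool.not_true,
    Bool.or_eq_false_iff, beq_eq_false_iff_ne, ne_eq, Prod.mk.injEq, not_and, hcont] at hpa hpb
  obtain ⟨⟨⟨⟨hs1, hs2⟩, hs3⟩, hs4⟩, hne0, hneg⟩ := hpa
  have hg : (List.map (fun _ : Int => List.map (fun _ : Int => (2 : Int)) (PySem.List.pyRange 0 cols 1))
      (PySem.List.pyRange 0 rows 1)) = pvTable rows cols (fun _ _ => 2) := rfl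
  rw [hg, pv_setCell_table rows cols 0 0 0 _ le_rfl (by omega) le_rfl (by omega),
      pv_setCell_table rows cols (rows - 1) (cols - 1) 5 _ (by omega) (by omega) (by omega) (by omega),
      pv_setCell_table rows cols s1 s2 3 _ hs1 hs2 hs3 hs4]
  have hcell : ∀ r c : Int,
      (if r = s1 ∧ c = s2 then (3 : Int) else if r = rows - 1 ∧ c = cols - 1 then 5
        else if r = 0 ∧ c = 0 then 0 else 2)
      = (((PySem.Dict.empty.insert ((0 : Int), (0 : Int)) 0).insert (rows - 1, cols - 1) 5).insert
          (s1, s2) 3).getD (r, c) 2 := by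
    intro r c
    rw [PySem.Dict.getD_insert, PySem.Dict.getD_insert, PySem.Dict.getD_insert, PySem.Dict.getD_empty]
    simp only [Prod.mk.injEq]
  unfold pvTable
  simp only [List.map_map, Function.comp_def, hcell]
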